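/- GENERATED by farm/mkstatement.py — do not edit. EVERY unit statement of the proof farm, imported together: this module
   compiles iff every statement compiles and no two units define the same name (182 units, one namespace each). -/
import Gif.Spec.Units.DGifBufferedInput_1
import Gif.Spec.Units.DGifBufferedInput_2
import Gif.Spec.Units.DGifBufferedInput_3
import Gif.Spec.Units.DGifBufferedInput_E
import Gif.Spec.Units.DGifBufferedInput_COMPOSITION
import Gif.Spec.Units.DGifCloseFile_1
import Gif.Spec.Units.DGifCloseFile_2
import Gif.Spec.Units.DGifCloseFile_3
import Gif.Spec.Units.DGifCloseFile_4
import Gif.Spec.Units.DGifCloseFile_5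
import Gif.Spec.Units.DGifCloseFile_COMPOSITION
import Gif.Spec.Units.DGifDecompressInput_P
import Gif.Spec.Units.DGifDecompressInput_1
import Gif.Spec.Units.DGifDecompressInput_2
import Gif.Spec.Units.DGifDecompressInput_3
import Gif.Spec.Units.DGifDecompressInput_E
import Gif.Spec.Units.DGifDecompressInput_COMPOSITION
import Gif.Spec.Units.DGifDecompressLine_P
import Gif.Spec.Units.DGifDecompressLine_1
import Gif.Spec.Units.DGifDecompressLine_2
import Gif.Spec.Units.DGifDecompressLine_3
import Gif.Spec.Units.DGifDecompressLine_4
import Gif.Spec.Units.DGifDecompressLine_5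
import Gif.Spec.Units.DGifDecompressLine_6
import Gif.Spec.Units.DGifDecompressLine_7
import Gif.Spec.Units.DGifDecompressLine_8
import Gif.Spec.Units.DGifDecompressLine_9
import Gif.Spec.Units.DGifDecompressLine_10
import Gif.Spec.Units.DGifDecompressLine_11
import Gif.Spec.Units.DGifDecompressLine_12
import Gif.Spec.Units.DGifDecompressLine_13
import Gif.Spec.Units.DGifDecompressLine_14
import Gif.Spec.Units.DGifDecompressLine_15
import Gif.Spec.Units.DGifDecompressLine_E
import Gif.Spec.Units.DGifDecompressLine_COMPOSITION
import Gif.Spec.Units.DGifDecreaseImageCounter_1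
import Gif.Spec.Units.DGifDecreaseImageCounter_2
import Gif.Spec.Units.DGifDecreaseImageCounter_3
import Gif.Spec.Units.DGifDecreaseImageCounter_E
import Gif.Spec.Units.DGifDecreaseImageCounter_COMPOSITION
import Gif.Spec.Units.DGifGetCodeNext_P
import Gif.Spec.Units.DGifGetCodeNext_1
import Gif.Spec.Units.DGifGetCodeNext_2
import Gif.Spec.Units.DGifGetCodeNext_E
import Gif.Spec.Units.DGifGetCodeNext_COMPOSITION
import Gif.Spec.Units.DGifGetExtension_P
import Gif.Spec.Units.DGifGetExtension_1
import Gif.Spec.Units.DGifGetExtension_2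
import Gif.Spec.Units.DGifGetExtension_E
import Gif.Spec.Units.DGifGetExtension_COMPOSITION
import Gif.Spec.Units.DGifGetExtensionNext_P
import Gif.Spec.Units.DGifGetExtensionNext_1
import Gif.Spec.Units.DGifGetExtensionNext_2
import Gif.Spec.Units.DGifGetExtensionNext_E
import Gif.Spec.Units.DGifGetExtensionNext_COMPOSITION
import Gif.Spec.Units.DGifGetImageDesc_1
import Gif.Spec.Units.DGifGetImageDesc_2
import Gif.Spec.Units.DGifGetImageDesc_3
import Gif.Spec.Units.DGifGetImageDesc_4
import Gif.Spec.Units.DGifGetImageDesc_5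
import Gif.Spec.Units.DGifGetImageDesc_6
import Gif.Spec.Units.DGifGetImageDesc_E
import Gif.Spec.Units.DGifGetImageDesc_COMPOSITION
import Gif.Spec.Units.DGifGetImageHeader_P
import Gif.Spec.Units.DGifGetImageHeader_1
import Gif.Spec.Units.DGifGetImageHeader_2
import Gif.Spec.Units.DGifGetImageHeader_3
import Gif.Spec.Units.DGifGetImageHeader_4
import Gif.Spec.Units.DGifGetImageHeader_5
import Gif.Spec.Units.DGifGetImageHeader_6
import Gif.Spec.Units.DGifGetImageHeader_E
import Gif.Spec.Units.DGifGetImageHeader_COMPOSITION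
import Gif.Spec.Units.DGifGetLine_P
import Gif.Spec.Units.DGifGetLine_1
import Gif.Spec.Units.DGifGetLine_2
import Gif.Spec.Units.DGifGetLine_3
import Gif.Spec.Units.DGifGetLine_E
import Gif.Spec.Units.DGifGetLine_COMPOSITION
import Gif.Spec.Units.DGifGetPrefixChar
import Gif.Spec.Units.DGifGetRecordType_P
import Gif.Spec.Units.DGifGetRecordType_1
import Gif.Spec.Units.DGifGetRecordType_2
import Gif.Spec.Units.DGifGetRecordType_E
import Gif.Spec.Units.DGifGetRecordType_COMPOSITION
import Gif.Spec.Units.DGifGetScreenDesc_P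
import Gif.Spec.Units.DGifGetScreenDesc_1
import Gif.Spec.Units.DGifGetScreenDesc_2
import Gif.Spec.Units.DGifGetScreenDesc_3
import Gif.Spec.Units.DGifGetScreenDesc_4
import Gif.Spec.Units.DGifGetScreenDesc_5
import Gif.Spec.Units.DGifGetScreenDesc_6
import Gif.Spec.Units.DGifGetScreenDesc_E
import Gif.Spec.Units.DGifGetScreenDesc_COMPOSITION
import Gif.Spec.Units.DGifGetWord_P
import Gif.Spec.Units.DGifGetWord_1
import Gif.Spec.Units.DGifGetWord_E
import Gif.Spec.Units.DGifGetWord_COMPOSITION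
import Gif.Spec.Units.DGifOpen_P
import Gif.Spec.Units.DGifOpen_1
import Gif.Spec.Units.DGifOpen_2
import Gif.Spec.Units.DGifOpen_3
import Gif.Spec.Units.DGifOpen_4
import Gif.Spec.Units.DGifOpen_5
import Gif.Spec.Units.DGifOpen_E
import Gif.Spec.Units.DGifOpen_COMPOSITION
import Gif.Spec.Units.DGifSetupDecompress_P
import Gif.Spec.Units.DGifSetupDecompress_1
import Gif.Spec.Units.DGifSetupDecompress_2
import Gif.Spec.Units.DGifSetupDecompress_3
import Gif.Spec.Units.DGifSetupDecompress_E
import Gif.Spec.Units.DGifSetupDecompress_COMPOSITION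
import Gif.Spec.Units.DGifSlurp_P
import Gif.Spec.Units.DGifSlurp_1
import Gif.Spec.Units.DGifSlurp_2
import Gif.Spec.Units.DGifSlurp_3
import Gif.Spec.Units.DGifSlurp_4
import Gif.Spec.Units.DGifSlurp_5
import Gif.Spec.Units.DGifSlurp_6
import Gif.Spec.Units.DGifSlurp_7
import Gif.Spec.Units.DGifSlurp_8
import Gif.Spec.Units.DGifSlurp_9
import Gif.Spec.Units.DGifSlurp_10
import Gif.Spec.Units.DGifSlurp_11
import Gif.Spec.Units.DGifSlurp_12
import Gif.Spec.Units.DGifSlurp_E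
import Gif.Spec.Units.DGifSlurp_COMPOSITION
import Gif.Spec.Units.run_ctors
import Gif.Spec.Units.sub_I_65535_1
import Gif.Spec.Units.start
import Gif.Spec.Units.digest_byte
import Gif.Spec.Units.digest_int
import Gif.Spec.Units.digest_bytes
import Gif.Spec.Units.strncmp
import Gif.Spec.Units.GifAddExtensionBlock_1
import Gif.Spec.Units.GifAddExtensionBlock_2
import Gif.Spec.Units.GifAddExtensionBlock_3
import Gif.Spec.Units.GifAddExtensionBlock_E
import Gif.Spec.Units.GifAddExtensionBlock_COMPOSITION
import Gif.Spec.Units.GifBitSize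
import Gif.Spec.Units.GifFreeExtensions_1
import Gif.Spec.Units.GifFreeExtensions_2
import Gif.Spec.Units.GifFreeExtensions_COMPOSITION
import Gif.Spec.Units.GifFreeMapObject
import Gif.Spec.Units.GifFreeSavedImages_1
import Gif.Spec.Units.GifFreeSavedImages_2
import Gif.Spec.Units.GifFreeSavedImages_3
import Gif.Spec.Units.GifFreeSavedImages_COMPOSITION
import Gif.Spec.Units.GifMakeMapObject_1
import Gif.Spec.Units.GifMakeMapObject_2
import Gif.Spec.Units.GifMakeMapObject_E
import Gif.Spec.Units.GifMakeMapObject_COMPOSITION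
import Gif.Spec.Units.InternalRead
import Gif.Spec.Units.digest_extensions_1
import Gif.Spec.Units.digest_extensions_2
import Gif.Spec.Units.digest_extensions_E
import Gif.Spec.Units.digest_extensions_COMPOSITION
import Gif.Spec.Units.digest_file_1
import Gif.Spec.Units.digest_file_2
import Gif.Spec.Units.digest_file_3
import Gif.Spec.Units.digest_file_4
import Gif.Spec.Units.digest_file_5
import Gif.Spec.Units.digest_file_6
import Gif.Spec.Units.digest_file_7
import Gif.Spec.Units.digest_file_COMPOSITION
import Gif.Spec.Units.digest_map_1
import Gif.Spec.Units.digest_map_2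
import Gif.Spec.Units.digest_map_E
import Gif.Spec.Units.digest_map_COMPOSITION
import Gif.Spec.Units.gif_decode_P
import Gif.Spec.Units.gif_decode_1
import Gif.Spec.Units.gif_decode_2
import Gif.Spec.Units.gif_decode_3
import Gif.Spec.Units.gif_decode_4
import Gif.Spec.Units.gif_decode_5
import Gif.Spec.Units.gif_decode_E
import Gif.Spec.Units.gif_decode_COMPOSITION
import Gif.Spec.Units.mem_read
import Gif.Spec.Units.openbsd_reallocarray
import Gif.Spec.Units.prog_main_P
import Gif.Spec.Units.prog_main_1
import Gif.Spec.Units.prog_main_E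
import Gif.Spec.Units.prog_main_COMPOSITION
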